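-- pv_equiv track=rewrite | github.com/rosa-m7/ScalIoT-repo | my-app/routers/router_analitica.py | analizar_regularidad
-- ===== SOURCE A (Python) =====
-- def analizar_regularidad(lista_ordenes):
--     if len(lista_ordenes) < 4:
--         return "no hay suficientes datos para analizar la regularidad"
--     tendencia = []
--     for i in range(1, len(lista_ordenes)):
--         if lista_ordenes[i][1] and not lista_ordenes[i-1][1]:
--             tendencia.append("mejora")
--         elif not lista_ordenes[i][1] and lista_ordenes[i-1][1]:
--             tendencia.append("decae")
--
--     if tendencia.count("mejora") > tendencia.count("decae"):
--         return "adaptacion tardia: mejora durante la sesion"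
--     elif tendencia.count("decae") > tendencia.count("mejora"):
--         return "fatiga o problemas de atencion sostenida"
--     else:
--         return "rendimiento estable o inconsistente"
-- ===== SOURCE B (Python) =====
-- def analizar_regularidad(lista_ordenes):
--     if len(lista_ordenes) < 4:
--         return "no hay suficientes datos para analizar la regularidad"
--     first = bool(lista_ordenes[0][1])
--     last = bool(lista_ordenes[-1][1])
--     if last and not first:
--         return "adaptacion tardia: mejora durante la sesion"
--     if first and not last:
--         return "fatiga o problemas de atencion sostenida"
--     return "rendimiento estable o inconsistente"
-- ===== Notes on version B (the rewrite author's own statement) =====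
-- stated objective: simpler
-- what changed: The count of 'mejora' minus 'decae' transitions telescopes to last-first, so B drops the transition list and the loop entirely and decides from the first and last boolean alone.
import Mathlib
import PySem

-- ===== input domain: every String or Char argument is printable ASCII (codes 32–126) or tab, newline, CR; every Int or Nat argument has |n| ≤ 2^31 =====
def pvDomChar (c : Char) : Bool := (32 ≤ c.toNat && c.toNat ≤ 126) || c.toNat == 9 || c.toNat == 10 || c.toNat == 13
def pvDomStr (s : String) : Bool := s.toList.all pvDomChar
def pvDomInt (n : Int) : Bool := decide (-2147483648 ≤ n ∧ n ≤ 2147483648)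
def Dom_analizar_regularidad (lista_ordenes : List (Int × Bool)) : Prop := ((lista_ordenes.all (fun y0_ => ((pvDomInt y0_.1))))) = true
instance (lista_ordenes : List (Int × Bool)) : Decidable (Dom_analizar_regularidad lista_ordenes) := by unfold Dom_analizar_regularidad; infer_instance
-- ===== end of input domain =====

-- B replaces A's transition-list loop by the telescoped closed form: the 'mejora'/'decae' count
-- difference equals last − first, so only the first and last booleans are inspected (objective: simpler).

-- ===== PORT A =====
def analizar_regularidad (lista_ordenes : List (Int × Bool)) : String :=
  if lista_ordenes.length < 4 then "no hay suficientes datos para analizar la regularidad"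
  else
    let tendencia := (PySem.List.pyRange 1 (lista_ordenes.length : Int) 1).foldl
      (fun acc i =>
        if (PySem.List.pyGetD lista_ordenes i (0, false)).2
            && !(PySem.List.pyGetD lista_ordenes (i - 1) (0, false)).2 then acc ++ ["mejora"]
        else if !(PySem.List.pyGetD lista_ordenes i (0, false)).2
            && (PySem.List.pyGetD lista_ordenes (i - 1) (0, false)).2 then acc ++ ["decae"]
        else acc) []
    if tendencia.count "decae" < tendencia.count "mejora" then
      "adaptacion tardia: mejora durante la sesion"
    else if tendencia.count "mejora" < tendencia.count "decae" then
      "fatiga o problemas de atencion sostenida"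
    else "rendimiento estable o inconsistente"

-- ===== PORT B =====
def analizar_regularidad_alt (lista_ordenes : List (Int × Bool)) : String :=
  if lista_ordenes.length < 4 then "no hay suficientes datos para analizar la regularidad"
  else
    let first := (PySem.List.pyGetD lista_ordenes 0 (0, false)).2
    let last := (PySem.List.pyGetD lista_ordenes (-1) (0, false)).2
    if last && !first then "adaptacion tardia: mejora durante la sesion"
    else if first && !last then "fatiga o problemas de atencion sostenida"
    else "rendimiento estable o inconsistente"

-- ===== PRECONDITION & SPEC =====
def Spec_analizar_regularidad (lista_ordenes : List (Int × Bool)) (out : String) : Prop := out = analizar_regularidad_alt lista_ordenes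
instance (lista_ordenes : List (Int × Bool)) (out : String) : Decidable (Spec_analizar_regularidad lista_ordenes out) := by unfold Spec_analizar_regularidad; infer_instance

-- ===== CLAIM (what is proved, stated in full; the proofs are below) =====
def Claim_equal_analizar_regularidad : Prop := ∀ (lista_ordenes : List (Int × Bool)), Dom_analizar_regularidad lista_ordenes → Spec_analizar_regularidad lista_ordenes (analizar_regularidad lista_ordenes)

-- ===== LEMMAS AND PROOFS =====

-- The transitions A records, as a structural recursion over (previous boolean, remaining booleans).
def pvTrans : Bool → List Bool → List String
  | _, [] => []
  | p, b :: bs =>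
      (if b && !p then ["mejora"] else if !b && p then ["decae"] else []) ++ pvTrans b bs

-- Telescoping: the count difference depends only on the first and last boolean.
theorem pvTrans_counts (bs : List Bool) : ∀ p : Bool,
    ((pvTrans p bs).count "mejora" : Int) - (pvTrans p bs).count "decae"
      = (if bs.getLastD p then 1 else 0) - (if p then 1 else 0) := by
  induction bs with
  | nil => intro p; simp [pvTrans]
  | cons b bs ih =>
      intro p
      have h := ih b
      rw [List.getLastD_cons]
      cases p <;> cases b <;> simp [pvTrans] at h ⊢ <;> split_ifs at h ⊢ <;> omega

-- Python's l[-1] on a nonempty list is its last element.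
theorem pvPyLast (xs : List (Int × Bool)) : ∀ (x d : Int × Bool),
    PySem.List.pyGetD (x :: xs) (-1) d = xs.getLastD x := by
  induction xs with
  | nil => intro x d; rfl
  | cons y t ih =>
      intro x d
      rw [List.getLastD_cons, ← ih y d]
      simp [PySem.List.pyGetD, PySem.List.pyGet?, PySem.List.pyIdx?]
      rfl

theorem pvMapsnd_getLastD (xs : List (Int × Bool)) : ∀ x : Int × Bool,
    (xs.map Prod.snd).getLastD x.2 = (xs.getLastD x).2 := by
  induction xs with
  | nil => intro x; rfl
  | cons y t ih => intro x; rw [List.map_cons, List.getLastD_cons, List.getLastD_cons, ih y]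

-- A's indexed loop over range(1, len) equals pvTrans over the booleans from position k on.
theorem pvFold_eq_trans (l : List (Int × Bool)) :
    ∀ (bs : List (Int × Bool)) (k : Nat) (x : Int × Bool) (acc : List String),
    l.drop k = x :: bs →
    (PySem.List.pyRange ((k : Int) + 1) (l.length : Int) 1).foldl
      (fun acc i =>
        if (PySem.List.pyGetD l i (0, false)).2
            && !(PySem.List.pyGetD l (i - 1) (0, false)).2 then acc ++ ["mejora"]
        else if !(PySem.List.pyGetD l i (0, false)).2
            && (PySem.List.pyGetD l (i - 1) (0, false)).2 then acc ++ ["decae"]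
        else acc) acc
      = acc ++ pvTrans x.2 (bs.map Prod.snd) := by
  intro bs
  induction bs with
  | nil =>
      intro k x acc h
      have hlen : l.length = k + 1 := by
        have := congrArg List.length h
        simp [List.length_drop] at this
        omega
      rw [PySem.List.pyRange_one_eq_nil (by omega : (l.length : Int) ≤ (k : Int) + 1)]
      simp [pvTrans]
  | cons y ys ih =>
      intro k x acc h
      have hlen : k + 1 < l.length := by
        have := congrArg List.length h
        simp [List.length_drop] at this
        omega
      have hk : k < l.length := by omega
      have hdrop : l.drop (k + 1) = y :: ys := by
        have := congrArg List.tail h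
        simpa [List.tail_drop] using this
      have hx : l[k]'hk = x := by
        have h0 : (l.drop k)[0]'(by simp [h]) = x := by simp [h]
        simpa using h0
      have hy : l[k + 1]'hlen = y := by
        have h0 : (l.drop (k + 1))[0]'(by simp [hdrop]) = y := by simp [hdrop]
        simpa using h0
      rw [PySem.List.pyRange_one_cons (by exact_mod_cast hlen : (k : Int) + 1 < (l.length : Int))]
      have hgk : PySem.List.pyGetD l ((k : Int) + 1 - 1) (0, false) = x := by
        have he : ((k : Int) + 1 - 1) = (k : Int) := by ring
        rw [he, PySem.List.pyGetD_eq_getElem l _ (by positivity) (by exact_mod_cast hk)]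
        simpa using hx
      have hgk1 : PySem.List.pyGetD l ((k : Int) + 1) (0, false) = y := by
        have h1 : ((k : Int) + 1) = ((k + 1 : Nat) : Int) := by push_cast; ring
        rw [h1, PySem.List.pyGetD_eq_getElem l _ (by positivity) (by exact_mod_cast hlen)]
        simpa using hy
      simp only [List.foldl_cons, hgk, hgk1]
      have hstep := ih (k + 1) y
        (acc ++ (if y.2 && !x.2 then ["mejora"] else if !y.2 && x.2 then ["decae"] else []))
        hdrop
      have hcast : ((k + 1 : Nat) : Int) + 1 = (k : Int) + 1 + 1 := by push_cast; ring
      rw [hcast] at hstep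
      rw [show pvTrans x.2 ((y :: ys).map Prod.snd)
            = (if y.2 && !x.2 then ["mejora"] else if !y.2 && x.2 then ["decae"] else [])
              ++ pvTrans y.2 (ys.map Prod.snd) from by simp [pvTrans], ← List.append_assoc, ← hstep]
      cases y.2 <;> cases x.2 <;> simp

-- ===== VERDICT (by name: the statement is the Claim_ definition above) =====
theorem analizar_regularidad_spec : Claim_equal_analizar_regularidad := by
  unfold Claim_equal_analizar_regularidad
  intro l _
  unfold Spec_analizar_regularidad analizar_regularidad analizar_regularidad_alt
  by_cases hlen : l.length < 4
  · simp [hlen]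
  · obtain ⟨x, xs, rfl⟩ : ∃ x xs, l = x :: xs := by
      cases l with
      | nil => simp at hlen
      | cons a t => exact ⟨a, t, rfl⟩
    simp only [hlen, if_false]
    have hfold := pvFold_eq_trans (x :: xs) xs 0 x [] (by simp)
    rw [show ((0 : Nat) : Int) + 1 = 1 by norm_num] at hfold
    have hfirst : (PySem.List.pyGetD (x :: xs) 0 (0, false)).2 = x.2 := by
      rw [PySem.List.pyGetD_eq_getElem _ _ (by norm_num) (by simp)]
      simp
    have hlast : (PySem.List.pyGetD (x :: xs) (-1) (0, false)).2
        = (xs.map Prod.snd).getLastD x.2 := by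
      rw [pvPyLast xs x, ← pvMapsnd_getLastD]
    rw [hfold, hfirst, hlast]
    simp only [List.nil_append]
    have hc := pvTrans_counts (xs.map Prod.snd) x.2
    cases hf : x.2 with
    | false =>
      rw [hf] at hc
      cases hl : (xs.map Prod.snd).getLastD false with
      | false =>
          rw [hl] at hc; norm_num at hc
          split_ifs <;> first | rfl | (exfalso; omega) | simp_all
      | true =>
          rw [hl] at hc; norm_num at hc
          split_ifs <;> first | rfl | (exfalso; omega) | simp_all
    | true =>
      rw [hf] at hc
      cases hl : (xs.map Prod.snd).getLastD true with
      | false =>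
          rw [hl] at hc; norm_num at hc
          split_ifs <;> first | rfl | (exfalso; omega) | simp_all
      | true =>
          rw [hl] at hc; norm_num at hc
          split_ifs <;> first | rfl | (exfalso; omega) | simp_all
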